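-- pv_equiv track=rewrite | github.com/Akhanda99/Algoexpert-Problem | Best_seat.py | bestSeat
-- ===== SOURCE A (Python) =====
-- def bestSeat(seats):
--     # Write your code here.
--     count=0
--     cList=[]
--     flag=1
--     pos=0
--     max=0
--     for i in range(0,len(seats)):
--         if seats[i]==1:
--             if flag==0:
--                 flag=1
--                 cList.append([pos,count])
--                 if count>max:
--                     max= count
--         else:
--             if flag ==0:
--                 count+=1
--             else:
--                 count=1
--                 flag=0
--                 pos=i
--     if max==0:
--         ans=-1
--     else:
--         for i in range(0,len(cList)):
--             if cList[i][1]==max: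
--                 if max%2==0:
--                     ans=cList[i][0]+(max//2)-1
--                     break
--                 else:
--                     ans= cList[i][0]+(max//2)
--                     break
--
--     return ans
-- ===== SOURCE B (Python) =====
-- def bestSeat(seats):
--     # Single pass: track the current run of empty seats and the best answer
--     # directly; a trailing empty run is never flushed (no terminating 1),
--     # matching the task's "run between occupied seats" reading.
--     best = -1
--     bestLen = 0
--     start = 0
--     runLen = 0
--     for i, s in enumerate(seats):
--         if s == 1:
--             if runLen > bestLen:
--                 bestLen = runLen
--                 best = start + (runLen - 1) // 2
--             runLen = 0
--         else:
--             if runLen == 0: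
--                 start = i
--             runLen += 1
--     return best
-- ===== Notes on version B (the rewrite author's own statement) =====
-- stated objective: simpler
-- what changed: A records every empty run in a list and then rescans that list for the first run of maximal length with separate even/odd middle formulas; B does one pass that maintains the best answer directly with the single formula start + (len-1)//2, never building the run list or the second loop.
import Mathlib
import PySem

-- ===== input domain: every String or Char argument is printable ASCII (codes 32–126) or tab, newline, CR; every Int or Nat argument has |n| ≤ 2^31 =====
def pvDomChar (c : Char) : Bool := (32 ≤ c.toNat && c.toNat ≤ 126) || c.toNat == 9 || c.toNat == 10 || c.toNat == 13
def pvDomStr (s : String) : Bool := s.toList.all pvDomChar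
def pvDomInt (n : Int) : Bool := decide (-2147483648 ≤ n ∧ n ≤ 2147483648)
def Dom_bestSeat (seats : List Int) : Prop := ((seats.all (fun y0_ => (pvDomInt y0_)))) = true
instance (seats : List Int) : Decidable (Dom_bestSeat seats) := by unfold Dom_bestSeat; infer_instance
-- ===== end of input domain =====

-- B replaces A's two-phase "collect all runs into a list, then rescan it for the max"
-- with a single pass maintaining the best answer directly (no intermediate list,
-- one unified middle formula); objective: simpler.

-- ===== PORT A =====
-- state = (count, cList, flag, pos, max); loop over seats carrying the index i
def bestSeatLoopA : List Int → Int → (Int × List (Int × Int) × Int × Int × Int) →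
    (Int × List (Int × Int) × Int × Int × Int)
  | [], _, st => st
  | s :: rest, i, (count, cList, flag, pos, mx) =>
    if s == 1 then
      if flag == 0 then
        bestSeatLoopA rest (i + 1)
          (count, cList ++ [(pos, count)], 1, pos, if count > mx then count else mx)
      else
        bestSeatLoopA rest (i + 1) (count, cList, flag, pos, mx)
    else
      if flag == 0 then
        bestSeatLoopA rest (i + 1) (count + 1, cList, flag, pos, mx)
      else
        bestSeatLoopA rest (i + 1) (1, cList, 0, i, mx)

-- A's second loop ("for i in range(len(cList)) … break"): first entry of length mx.
-- The [] case is unreachable when mx ≠ 0 (an entry of length mx is always in cList).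
def bestSeatScanA : List (Int × Int) → Int → Int
  | [], _ => -1
  | (p, c) :: rest, mx =>
    if c == mx then
      if PySem.Int.mod mx 2 == 0 then p + PySem.Int.floordiv mx 2 - 1
      else p + PySem.Int.floordiv mx 2
    else bestSeatScanA rest mx

def bestSeat (seats : List Int) : Int :=
  match bestSeatLoopA seats 0 (0, [], 1, 0, 0) with
  | (_, cList, _, _, mx) => if mx == 0 then -1 else bestSeatScanA cList mx

-- ===== PORT B =====
-- state = (best, bestLen, start, runLen); one pass, answer maintained directly
def bestSeatLoopB : List Int → Int → (Int × Int × Int × Int) → Int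
  | [], _, (best, _, _, _) => best
  | s :: rest, i, (best, bestLen, start, runLen) =>
    if s == 1 then
      if runLen > bestLen then
        bestSeatLoopB rest (i + 1)
          (start + PySem.Int.floordiv (runLen - 1) 2, runLen, start, 0)
      else
        bestSeatLoopB rest (i + 1) (best, bestLen, start, 0)
    else
      bestSeatLoopB rest (i + 1)
        (best, bestLen, if runLen == 0 then i else start, runLen + 1)

def bestSeat_alt (seats : List Int) : Int :=
  bestSeatLoopB seats 0 (-1, 0, 0, 0)

-- ===== PRECONDITION & SPEC =====
def Spec_bestSeat (seats : List Int) (out : Int) : Prop := out = bestSeat_alt seats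
instance (seats : List Int) (out : Int) : Decidable (Spec_bestSeat seats out) := by unfold Spec_bestSeat; infer_instance

-- ===== CLAIM (what is proved, stated in full; the proofs are below) =====
def Claim_equal_bestSeat : Prop := ∀ (seats : List Int), Dom_bestSeat seats → Spec_bestSeat seats (bestSeat seats)

-- ===== LEMMAS AND PROOFS =====

-- the state relation between A's loop state and B's loop state
def bestSeatInv (count : Int) (cList : List (Int × Int)) (flag pos mx : Int)
    (best bestLen start runLen : Int) : Prop :=
  bestLen = mx ∧ 0 ≤ mx ∧ 0 ≤ runLen ∧
  ((flag = 0 ∧ count = runLen ∧ pos = start ∧ 1 ≤ runLen) ∨ (flag = 1 ∧ runLen = 0)) ∧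
  (∀ p c, (p, c) ∈ cList → c ≤ mx) ∧
  (mx ≠ 0 → ∃ p, (p, mx) ∈ cList) ∧
  (if mx = 0 then (-1 : Int) else bestSeatScanA cList mx) = best

-- appending a run does not change the first match when one already exists
theorem scanA_append_of_exists (cList : List (Int × Int)) (mx : Int) (e : Int × Int)
    (h : ∃ p, (p, mx) ∈ cList) :
    bestSeatScanA (cList ++ [e]) mx = bestSeatScanA cList mx := by
  induction cList with
  | nil => obtain ⟨p, hp⟩ := h; simp at hp
  | cons hd tl ih =>
    obtain ⟨p, c⟩ := hd
    by_cases hc : c = mx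
    · simp [bestSeatScanA, hc]
    · obtain ⟨q, hq⟩ := h
      rcases List.mem_cons.mp hq with h1 | h1
      · exact absurd (congrArg Prod.snd h1).symm hc
      · simp only [List.cons_append, bestSeatScanA, beq_iff_eq, if_neg hc]
        exact ih ⟨q, h1⟩

-- scanning for a strictly larger length lands on the appended run
theorem scanA_append_new_max (cList : List (Int × Int)) (p0 mx : Int)
    (h : ∀ p c, (p, c) ∈ cList → c < mx) :
    bestSeatScanA (cList ++ [(p0, mx)]) mx =
      if PySem.Int.mod mx 2 == 0 then p0 + PySem.Int.floordiv mx 2 - 1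
      else p0 + PySem.Int.floordiv mx 2 := by
  induction cList with
  | nil => simp [bestSeatScanA]
  | cons hd tl ih =>
    obtain ⟨p, c⟩ := hd
    have hc : c ≠ mx := ne_of_lt (h p c (List.mem_cons_self ..))
    simpa [bestSeatScanA, hc] using ih (fun q d hd => h q d (List.mem_cons_of_mem _ hd))

-- A's even/odd middle formula collapses to B's (len-1)//2 for a positive length
theorem middle_formula (p0 mx : Int) :
    (if PySem.Int.mod mx 2 == 0 then p0 + PySem.Int.floordiv mx 2 - 1
     else p0 + PySem.Int.floordiv mx 2) = p0 + PySem.Int.floordiv (mx - 1) 2 := by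
  rw [PySem.Int.mod_eq_emod_of_pos (by omega), PySem.Int.floordiv_eq_ediv_of_pos (by omega),
      PySem.Int.floordiv_eq_ediv_of_pos (by omega)]
  by_cases hp : mx % 2 = 0 <;> simp [hp] <;> omega

-- main loop lemma: under the invariant the two loops produce the same answer
theorem loop_agree (l : List Int) (i count : Int) (cList : List (Int × Int))
    (flag pos mx best bestLen start runLen : Int)
    (hInv : bestSeatInv count cList flag pos mx best bestLen start runLen) :
    (if (bestSeatLoopA l i (count, cList, flag, pos, mx)).2.2.2.2 = 0 then (-1 : Int)
     else bestSeatScanA (bestSeatLoopA l i (count, cList, flag, pos, mx)).2.1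
            (bestSeatLoopA l i (count, cList, flag, pos, mx)).2.2.2.2) =
    bestSeatLoopB l i (best, bestLen, start, runLen) := by
  induction l generalizing i count cList flag pos mx best bestLen start runLen with
  | nil =>
    obtain ⟨_, _, _, _, _, _, h7⟩ := hInv
    simpa only [bestSeatLoopA, bestSeatLoopB] using h7
  | cons s rest ih =>
    obtain ⟨h1, h2, h3, h4, h5, h6, h7⟩ := hInv
    by_cases hs : s = 1
    · -- occupied seat
      rcases h4 with ⟨hf, hc, hp, hr⟩ | ⟨hf, hr⟩
      · -- inside a run: A flushes (pos, count); B possibly updates best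
        by_cases hgt : runLen > bestLen
        · -- new maximum
          simp only [bestSeatLoopA, bestSeatLoopB, beq_iff_eq, hs, hf, if_true,
            if_pos hgt, if_pos (by omega : count > mx)]
          refine ih _ _ _ _ _ _ _ _ _ _ ⟨hc.symm, by omega, le_refl 0, Or.inr ⟨rfl, rfl⟩, ?_, ?_, ?_⟩
          · intro p c hm
            rcases List.mem_append.mp hm with hm | hm
            · have := h5 p c hm; omega
            · simp at hm; omega
          · intro _; exact ⟨pos, List.mem_append_right _ (by simp)⟩
          · rw [if_neg (by omega : ¬ count = 0), hp, hc,
              scanA_append_new_max _ _ _ (fun p c hm => by have := h5 p c hm; omega),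
              middle_formula _ _]
        · -- run not longer than the best: max unchanged, first match unchanged
          simp only [bestSeatLoopA, bestSeatLoopB, beq_iff_eq, hs, hf, if_true,
            if_neg hgt, if_neg (by omega : ¬ count > mx)]
          have hmx0 : mx ≠ 0 := by omega
          refine ih _ _ _ _ _ _ _ _ _ _ ⟨h1, h2, le_refl 0, Or.inr ⟨rfl, rfl⟩, ?_, ?_, ?_⟩
          · intro p c hm
            rcases List.mem_append.mp hm with hm | hm
            · exact h5 p c hm
            · simp at hm; omega
          · intro _
            obtain ⟨p, hp'⟩ := h6 hmx0
            exact ⟨p, List.mem_append_left _ hp'⟩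
          · rw [if_neg hmx0, scanA_append_of_exists _ _ _ (h6 hmx0), ← h7, if_neg hmx0]
      · -- not inside a run: both states pass through
        simp only [bestSeatLoopA, bestSeatLoopB, beq_iff_eq, hs, hf, hr, if_true, zero_add,
          if_neg (by omega : ¬ (1:Int) = 0), if_neg (by omega : ¬ (0:Int) > bestLen)]
        exact ih _ _ _ _ _ _ _ _ _ _ ⟨h1, h2, le_refl 0, Or.inr ⟨rfl, rfl⟩, h5, h6, h7⟩
    · -- empty seat
      rcases h4 with ⟨hf, hc, hp, hr⟩ | ⟨hf, hr⟩
      · -- run continues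
        simp only [bestSeatLoopA, bestSeatLoopB, beq_iff_eq, if_neg hs, hf, if_true,
          if_neg (by omega : ¬ runLen = 0)]
        exact ih _ _ _ _ _ _ _ _ _ _
          ⟨h1, h2, by omega, Or.inl ⟨rfl, by omega, hp, by omega⟩, h5, h6, h7⟩
      · -- run starts at index i
        simp only [bestSeatLoopA, bestSeatLoopB, beq_iff_eq, if_neg hs, hf, hr, if_true, zero_add,
          if_neg (by omega : ¬ (1:Int) = 0)]
        exact ih _ _ _ _ _ _ _ _ _ _
          ⟨h1, h2, by omega, Or.inl ⟨rfl, rfl, rfl, le_refl 1⟩, h5, h6, h7⟩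

-- ===== VERDICT (by name: the statement is the Claim_ definition above) =====
theorem bestSeat_spec : Claim_equal_bestSeat := by
  intro seats _
  show bestSeat seats = bestSeat_alt seats
  simp only [bestSeat, bestSeat_alt, beq_iff_eq]
  exact loop_agree seats 0 0 [] 1 0 0 (-1) 0 0 0
    ⟨rfl, le_refl 0, le_refl 0, Or.inr ⟨rfl, rfl⟩, by simp, by simp, rfl⟩
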